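-- pv_equiv track=rewrite | github.com/tranduythanh/schubertpy | schubertpy/partition.py | is_valid_part
-- ===== SOURCE A (Python) =====
-- from typing import List
--
-- def _is_non_increasing(part: List[int]):
--     # Iterate through the list, comparing each element with the next one
--     for i in range(len(part) - 1):
--         # If the current element is smaller than the next one,
--         # the list is not in descending order
--         if part[i] < part[i + 1]:
--             return False
--     return True
--
-- def is_valid_part(part: List[int]) -> bool:
--     if not isinstance(part, list):
--         return False
--     if not all(isinstance(x, int) for x in part):
--         return False
--     if not all(x >= 0 for x in part):
--         return False
--     if not _is_non_increasing(part):
--         return False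
--     return True
-- ===== SOURCE B (Python) =====
-- def is_valid_part(part):
--     if not isinstance(part, list):
--         return False
--     if not all(isinstance(x, int) for x in part):
--         return False
--     if not all(x >= 0 for x in part):
--         return False
--     return part == sorted(part, reverse=True)
-- ===== Notes on version B (the rewrite author's own statement) =====
-- stated objective: alternative
-- what changed: The adjacent-pair index loop testing non-increasing order is replaced by comparing the list for equality with sorted(part, reverse=True).
import Mathlib
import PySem

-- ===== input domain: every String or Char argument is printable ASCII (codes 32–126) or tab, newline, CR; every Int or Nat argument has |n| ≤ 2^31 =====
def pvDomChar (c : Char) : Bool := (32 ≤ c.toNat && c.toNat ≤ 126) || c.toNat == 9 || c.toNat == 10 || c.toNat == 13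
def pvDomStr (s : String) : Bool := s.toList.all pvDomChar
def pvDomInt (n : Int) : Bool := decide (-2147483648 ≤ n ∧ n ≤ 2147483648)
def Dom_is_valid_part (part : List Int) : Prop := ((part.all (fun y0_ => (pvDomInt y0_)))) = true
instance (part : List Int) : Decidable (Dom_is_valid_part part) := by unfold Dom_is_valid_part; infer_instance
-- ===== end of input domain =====

-- B replaces A's adjacent-pair index loop for the non-increasing check by an equality
-- comparison with sorted(part, reverse=True) (objective: alternative decomposition).


-- ===== PORT A =====
-- the 'for i in range(len(part)-1)' loop of _is_non_increasing, with its early 'return False'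
def pvNonincLoop (part : List Int) : List Int → Bool
  | [] => true
  | i :: rest =>
      -- part[i] and part[i+1]; i produced by range(len(part)-1) is always in range, default never read
      if PySem.List.pyGetD part i 0 < PySem.List.pyGetD part (i + 1) 0 then false
      else pvNonincLoop part rest

def pv_is_non_increasing (part : List Int) : Bool :=
  pvNonincLoop part (PySem.List.pyRange 0 (PySem.List.len part - 1) 1)

-- isinstance(part, list) and isinstance(x, int) are true for every List Int by typing
def is_valid_part (part : List Int) : Bool :=
  if ¬ (part.all (fun x => decide (0 ≤ x))) then false
  else if ¬ (pv_is_non_increasing part) then false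
  else true

-- ===== PORT B =====
def is_valid_part_alt (part : List Int) : Bool :=
  if ¬ (part.all (fun x => decide (0 ≤ x))) then false
  else decide (part = PySem.List.sorted part (fun x => x) true)

-- ===== PRECONDITION & SPEC =====
def Spec_is_valid_part (part : List Int) (out : Bool) : Prop := out = is_valid_part_alt part
instance (part : List Int) (out : Bool) : Decidable (Spec_is_valid_part part out) := by unfold Spec_is_valid_part; infer_instance

-- ===== CLAIM (what is proved, stated in full; the proofs are below) =====
def Claim_equal_is_valid_part : Prop := ∀ (part : List Int), Dom_is_valid_part part → Spec_is_valid_part part (is_valid_part part)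

-- ===== LEMMAS AND PROOFS =====

-- the index loop, started at k, checks exactly the adjacent pairs from position k on
lemma pvNonincLoop_iff_aux (part : List Int) : ∀ (m k : Nat), part.length - k = m →
    (pvNonincLoop part (PySem.List.pyRange (k : Int) (PySem.List.len part - 1) 1) = true ↔
      ∀ j : Nat, k ≤ j → (h : j + 1 < part.length) → ¬ part[j] < part[j + 1]) := by
  intro m
  induction m with
  | zero =>
    intro k hk
    rw [PySem.List.pyRange_one_eq_nil (by simp [PySem.List.len]; omega)]
    constructor
    · intro _ j hkj hj
      omega
    · intro _
      simp [pvNonincLoop]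
  | succ m ih =>
    intro k hk
    by_cases hlt : k + 1 < part.length
    · rw [PySem.List.pyRange_one_cons (by simp [PySem.List.len]; omega)]
      have hgk : PySem.List.pyGetD part (k : Int) 0 = part[k]'(by omega) := by
        rw [PySem.List.pyGetD_natCast, List.getD_eq_getElem _ _ (by omega)]
      have hgk1 : PySem.List.pyGetD part ((k : Int) + 1) 0 = part[k + 1]'(by omega) := by
        have : ((k : Int) + 1) = ((k + 1 : Nat) : Int) := by push_cast; ring
        rw [this, PySem.List.pyGetD_natCast, List.getD_eq_getElem _ _ (by omega)]
      simp only [pvNonincLoop, hgk, hgk1]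
      by_cases hpair : part[k]'(by omega) < part[k + 1]'(by omega)
      · simp only [if_pos hpair]
        constructor
        · intro h; exact absurd h (by simp)
        · intro h
          exact absurd hpair (h k le_rfl hlt)
      · simp only [if_neg hpair]
        have : ((k : Int) + 1) = ((k + 1 : Nat) : Int) := by push_cast; ring
        rw [this, ih (k + 1) (by omega)]
        constructor
        · intro h j hkj hj
          rcases Nat.eq_or_lt_of_le hkj with rfl | hlt2
          · exact hpair
          · exact h j hlt2 hj
        · intro h j hkj hj
          exact h j (by omega) hj
    · rw [PySem.List.pyRange_one_eq_nil (by simp [PySem.List.len]; omega)]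
      constructor
      · intro _ j hkj hj
        omega
      · intro _
        simp [pvNonincLoop]

lemma pv_is_non_increasing_iff (part : List Int) :
    pv_is_non_increasing part = true ↔ part.Pairwise (fun a b => b ≤ a) := by
  have h0 : ((0 : Nat) : Int) = (0 : Int) := rfl
  rw [pv_is_non_increasing, ← h0, pvNonincLoop_iff_aux part part.length 0 (by omega),
    ← List.isChain_iff_pairwise, List.isChain_iff_getElem]
  constructor
  · intro h i hi
    simpa using not_lt.mp (h i (Nat.zero_le i) hi)
  · intro h j _ hj
    exact not_lt.mpr (h j hj)

-- ===== VERDICT (by name: the statement is the Claim_ definition above) =====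
theorem is_valid_part_spec : Claim_equal_is_valid_part := by
  intro part _
  unfold Spec_is_valid_part is_valid_part is_valid_part_alt
  by_cases hall : part.all (fun x => decide (0 ≤ x))
  · simp only [hall, not_true, if_false, Bool.not_eq_true]
    by_cases hni : pv_is_non_increasing part = true
    · have hp : part.Pairwise (fun a b => b ≤ a) := (pv_is_non_increasing_iff part).mp hni
      have := PySem.List.sorted_rev_eq_self_of_pairwise (key := fun x => x) (xs := part) hp
      simp [hni, this]
    · have hp : ¬ part.Pairwise (fun a b => b ≤ a) :=
        fun h => hni ((pv_is_non_increasing_iff part).mpr h)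
      have hne : part ≠ PySem.List.sorted part (fun x => x) true := by
        intro he
        exact hp (by simpa using he ▸ PySem.List.sorted_pairwise_rev (xs := part) (key := fun x => x))
      simp [hni, hne]
  · simp [hall]
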